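-- pv_equiv track=rewrite | github.com/ErikBoee/AdventOfCode | 2024/December14/b.py | eightConsecutiveRobots
-- ===== SOURCE A (Python) =====
-- def eightConsecutiveRobots(map):
--     for y in range(len(map)):
--         line = map[y]
--         numberOfConsecutive = 0
--         for x in range(len(line)):
--             if line[x] != ".":
--                 numberOfConsecutive += 1
--             else:
--                 numberOfConsecutive = 0
--             if numberOfConsecutive == 9:
--                 return True
--     return False
-- ===== SOURCE B (Python) =====
-- def eightConsecutiveRobots(map):
--     return any(
--         all(c != "." for c in line[x:x + 9])
--         for line in map
--         for x in range(len(line) - 8)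
--     )
-- ===== Notes on version B (the rewrite author's own statement) =====
-- stated objective: simpler
-- what changed: Replaces the consecutive-counter-with-reset loop and early return by a single any/all expression over all width-9 windows of each row.
import Mathlib
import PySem

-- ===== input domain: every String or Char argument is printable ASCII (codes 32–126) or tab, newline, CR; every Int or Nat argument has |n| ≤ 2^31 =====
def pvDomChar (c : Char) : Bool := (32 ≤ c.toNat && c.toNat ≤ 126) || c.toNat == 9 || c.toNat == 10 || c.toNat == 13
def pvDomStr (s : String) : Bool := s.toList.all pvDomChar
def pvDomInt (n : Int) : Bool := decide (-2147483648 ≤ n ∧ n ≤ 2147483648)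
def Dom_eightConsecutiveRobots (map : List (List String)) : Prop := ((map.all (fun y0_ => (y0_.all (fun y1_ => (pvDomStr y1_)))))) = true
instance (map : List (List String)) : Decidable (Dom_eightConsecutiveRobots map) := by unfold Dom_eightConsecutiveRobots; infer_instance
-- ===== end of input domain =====

-- B replaces A's reset-counter scan by an any/all check over all width-9 windows per row (simpler, not faster).


-- ===== PORT A =====
-- counter loop over one row: k' = k+1 on non-dot, reset to 0 on dot, return True at 9
def lineLoopA : List String → Nat → Bool
  | [], _ => false
  | c :: rest, k =>
    let k' := if c != "." then k + 1 else 0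
    if k' = 9 then true else lineLoopA rest k'

def eightConsecutiveRobots : List (List String) → Bool
  | [] => false
  | line :: rest =>
    if lineLoopA line 0 then true else eightConsecutiveRobots rest

-- ===== PORT B =====
-- line[x:x+9] with x ≥ 0 is exactly (line.drop x).take 9
def eightConsecutiveRobots_alt (map : List (List String)) : Bool :=
  map.any (fun line =>
    (List.range (line.length - 8)).any (fun x =>
      ((line.drop x).take 9).all (fun c => c != ".")))

-- ===== PRECONDITION & SPEC =====
def Spec_eightConsecutiveRobots (map : List (List String)) (out : Bool) : Prop := out = eightConsecutiveRobots_alt map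
instance (map : List (List String)) (out : Bool) : Decidable (Spec_eightConsecutiveRobots map out) := by unfold Spec_eightConsecutiveRobots; infer_instance

-- ===== CLAIM (what is proved, stated in full; the proofs are below) =====
def Claim_equal_eightConsecutiveRobots : Prop := ∀ (map : List (List String)), Dom_eightConsecutiveRobots map → Spec_eightConsecutiveRobots map (eightConsecutiveRobots map)

-- ===== LEMMAS AND PROOFS =====

-- S9 l: some width-9 window of l is all non-dot
def S9 (l : List String) : Prop :=
  ∃ x, x + 9 ≤ l.length ∧ ((l.drop x).take 9).all (fun c => c != ".") = true

theorem S9_cons_dot (t : List String) :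
    S9 ("." :: t) ↔ S9 t := by
  constructor
  · rintro ⟨x, hx, hall⟩
    cases x with
    | zero => simp at hall
    | succ n => exact ⟨n, by simpa using hx, by simpa using hall⟩
  · rintro ⟨x, hx, hall⟩
    exact ⟨x + 1, by simpa using hx, by simpa using hall⟩

theorem S9_cons_nd (c : String) (t : List String) (_hc : (c != ".") = true) :
    S9 (c :: t) ↔ ((9 ≤ t.length + 1 ∧ ((c :: t).take 9).all (fun c => c != ".") = true) ∨ S9 t) := by
  constructor
  · rintro ⟨x, hx, hall⟩
    cases x with
    | zero => exact Or.inl ⟨by simpa using hx, by simpa using hall⟩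
    | succ n => exact Or.inr ⟨n, by simpa using hx, by simpa using hall⟩
  · rintro (⟨hl, hall⟩ | ⟨x, hx, hall⟩)
    · exact ⟨0, by simpa using hl, by simpa using hall⟩
    · exact ⟨x + 1, by simpa using hx, by simpa using hall⟩

theorem all_take_mono (t : List String) (a b : Nat) (hab : a ≤ b)
    (h : (t.take b).all (fun c => c != ".") = true) :
    (t.take a).all (fun c => c != ".") = true := by
  rw [List.all_eq_true] at h ⊢
  intro x hx
  have hx' : x ∈ List.take b t := by
    have heq : List.take a t = List.take a (List.take b t) := by
      rw [List.take_take, Nat.min_eq_left hab]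
    exact List.take_subset _ _ (heq ▸ hx)
  exact h x hx' 

-- invariant of A's counter loop
theorem lineLoopA_char (l : List String) : ∀ k : Nat, k ≤ 8 →
    (lineLoopA l k = true ↔
      ((9 - k ≤ l.length ∧ (l.take (9 - k)).all (fun c => c != ".") = true) ∨ S9 l)) := by
  induction l with
  | nil =>
    intro k hk
    simp [lineLoopA, S9]
    omega
  | cons c t ih =>
    intro k hk
    by_cases hc : (c != ".") = true
    · by_cases hk8 : k = 8
      · subst hk8
        constructor
        · intro _
          exact Or.inl ⟨by simp, by
            have h1 : (9 : Nat) - 8 = 1 := by norm_num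
            rw [h1]; simpa using hc⟩
        · intro _; simp [lineLoopA, hc]
      · have hk7 : k ≤ 7 := by omega
        have hstep : lineLoopA (c :: t) k = lineLoopA t (k + 1) := by
          simp [lineLoopA, hc]; omega
        rw [hstep, ih (k + 1) (by omega), S9_cons_nd c t hc]
        have h89 : 9 - (k + 1) = 8 - k := by omega
        rw [h89]
        have htake : (c :: t).take (9 - k) = c :: t.take (8 - k) := by
          have h1 : 9 - k = (8 - k) + 1 := by omega
          rw [h1, List.take_succ_cons]
        constructor
        · rintro (⟨hl, hall⟩ | hs)
          · refine Or.inl ⟨by simp only [List.length_cons]; omega, ?_⟩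
            rw [htake, List.all_cons, Bool.and_eq_true]
            exact ⟨hc, hall⟩
          · exact Or.inr (Or.inr hs)
        · rintro (⟨hl, hall⟩ | (⟨hl, hall⟩ | hs))
          · rw [htake, List.all_cons, Bool.and_eq_true] at hall
            simp only [List.length_cons] at hl
            exact Or.inl ⟨by omega, hall.2⟩
          · -- window at 0 implies the prefix condition
            have h9 : (c :: t).take 9 = c :: t.take 8 := by rw [List.take_succ_cons]
            rw [h9, List.all_cons, Bool.and_eq_true] at hall
            exact Or.inl ⟨by omega, all_take_mono t (8 - k) 8 (by omega) hall.2⟩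
          · exact Or.inr hs
    · have hc' : c = "." := by simpa using hc
      subst hc'
      have hstep : lineLoopA ("." :: t) k = lineLoopA t 0 := by
        simp [lineLoopA]
      rw [hstep, ih 0 (by omega), S9_cons_dot]
      have htake : (("." : String) :: t).take (9 - k) = "." :: t.take (8 - k) := by
        have : 9 - k = (8 - k) + 1 := by omega
        rw [this, List.take_succ_cons]
      constructor
      · rintro (⟨hl, hall⟩ | hs)
        · exact Or.inr ⟨0, by simpa using hl, by simpa using hall⟩
        · exact Or.inr hs
      · rintro (⟨hl, hall⟩ | hs)
        · rw [htake] at hall; simp at hall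
        · exact Or.inr hs

-- B's per-line window scan computes exactly S9
theorem windowAny_iff (l : List String) :
    ((List.range (l.length - 8)).any (fun x =>
      ((l.drop x).take 9).all (fun c => c != "."))) = true ↔ S9 l := by
  rw [List.any_eq_true]
  constructor
  · rintro ⟨x, hx, hall⟩
    rw [List.mem_range] at hx
    exact ⟨x, by omega, hall⟩
  · rintro ⟨x, hx, hall⟩
    exact ⟨x, List.mem_range.mpr (by omega), hall⟩

theorem lineLoopA_eq_window (l : List String) :
    lineLoopA l 0 = ((List.range (l.length - 8)).any (fun x =>
      ((l.drop x).take 9).all (fun c => c != "."))) := by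
  rw [Bool.eq_iff_iff, lineLoopA_char l 0 (by omega), windowAny_iff]
  constructor
  · rintro (⟨hl, hall⟩ | hs)
    · exact ⟨0, by simpa using hl, by simpa using hall⟩
    · exact hs
  · exact Or.inr

-- ===== VERDICT (by name: the statement is the Claim_ definition above) =====
theorem ports_eq (map : List (List String)) :
    eightConsecutiveRobots map = eightConsecutiveRobots_alt map := by
  induction map with
  | nil => rfl
  | cons line rest ih =>
    rw [eightConsecutiveRobots, eightConsecutiveRobots_alt, List.any_cons,
      lineLoopA_eq_window]
    cases h : ((List.range (line.length - 8)).any (fun x =>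
        ((line.drop x).take 9).all (fun c => c != "."))) with
    | true => simp
    | false => simpa [h, eightConsecutiveRobots_alt] using ih

theorem eightConsecutiveRobots_spec : Claim_equal_eightConsecutiveRobots :=
  fun map _ => ports_eq map
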